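-- pv_equiv track=rewrite | github.com/sizzflair97/AutocompleteLM | utils/korean_english_multitarget_ted_talks_task/test.py | get_special_character_index_and_removed_string
-- ===== SOURCE A (Python) =====
-- special_character_list = ['`', '1', '2', '3', '4', '5', '6', '7', '8', '9', '0', "-", "=", "\\"
--                         '~', '!', '@', "#", "$", "5", "^", "&", "*", "(", ")", "_", "+", "|",
--                         "[", "]", "{", "}"
--                         ';', "'", ":", '"',
--                         ",", ".", "/",
--                         "<", ">", "?"]
--
-- def get_special_character_index_and_removed_string(x):
--
--     special_index_list=[]
--
--     for i in range(len(x)):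
--         if x[i] in special_character_list:
--             special_index_list.append(i)
--
--     for j in range(len(x), -1, -1):
--         if j in special_index_list:
--             x = x[:j] + x[j+1:]
--
--     return special_index_list, x
-- ===== SOURCE B (Python) =====
-- special_character_list = ['`', '1', '2', '3', '4', '5', '6', '7', '8', '9', '0', "-", "=", "\\"
--                         '~', '!', '@', "#", "$", "5", "^", "&", "*", "(", ")", "_", "+", "|",
--                         "[", "]", "{", "}"
--                         ';', "'", ":", '"',
--                         ",", ".", "/",
--                         "<", ">", "?"]
--
-- def get_special_character_index_and_removed_string(x):
--     # one pass: record the index of each special character, keep the others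
--     special_index_list = []
--     kept = []
--     for i, ch in enumerate(x):
--         if ch in special_character_list:
--             special_index_list.append(i)
--         else:
--             kept.append(ch)
--     return special_index_list, ''.join(kept)
-- ===== Notes on version B (the rewrite author's own statement) =====
-- stated objective: simpler
-- what changed: Replaces A's two-phase scheme (index scan, then a descending range loop that tests membership in the index list and rebuilds the string by slicing) with a single enumerate pass that collects the special indices and the kept characters simultaneously.
import Mathlib
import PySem

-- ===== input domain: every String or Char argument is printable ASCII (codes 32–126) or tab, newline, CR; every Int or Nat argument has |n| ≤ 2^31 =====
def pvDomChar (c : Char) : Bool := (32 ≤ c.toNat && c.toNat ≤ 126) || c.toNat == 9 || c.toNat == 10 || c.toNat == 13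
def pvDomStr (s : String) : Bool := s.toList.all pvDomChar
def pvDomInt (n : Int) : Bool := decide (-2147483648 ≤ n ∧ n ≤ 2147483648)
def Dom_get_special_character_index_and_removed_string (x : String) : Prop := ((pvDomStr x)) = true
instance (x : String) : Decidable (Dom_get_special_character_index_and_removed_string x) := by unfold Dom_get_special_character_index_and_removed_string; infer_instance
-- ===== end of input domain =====

-- B replaces A's index scan + descending membership/slice rebuild loop with one enumerate
-- pass collecting the special indices and the kept characters together.

-- ===== PORT A =====
-- the module constant special_character_list, verbatim (Python's implicit string
-- concatenation merges "\\" '~' into "\~" and "}" ';' into "};", kept as such)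
def pvSpecialCharacterList : List String :=
  ["`", "1", "2", "3", "4", "5", "6", "7", "8", "9", "0", "-", "=", "\\~",
   "!", "@", "#", "$", "5", "^", "&", "*", "(", ")", "_", "+", "|",
   "[", "]", "{", "};", "'", ":", "\"", ",", ".", "/", "<", ">", "?"]

-- the test 'x[i] in special_character_list' on the one-character string x[i]
def pvIsSpecial (c : Char) : Bool := pvSpecialCharacterList.contains (String.ofList [c])

def get_special_character_index_and_removed_string (x : String) : List Int × String :=
  -- first loop: for i in range(len(x)): if x[i] in special_character_list: append i
  let special_index_list : List Int :=
    (PySem.List.pyRange 0 (x.toList.length : Int) 1).foldl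
      (fun acc i => if pvIsSpecial (PySem.List.pyGetD x.toList i 'a') then acc ++ [i] else acc) []
  -- second loop: for j in range(len(x), -1, -1): if j in special_index_list: x = x[:j] + x[j+1:]
  -- (the string state is carried as its list of code points)
  let removed : List Char :=
    (PySem.List.pyRange (x.toList.length : Int) (-1) (-1)).foldl
      (fun s j =>
        if j ∈ special_index_list then
          PySem.List.slice s none (some j) ++ PySem.List.slice s (some (j + 1)) none
        else s) x.toList
  (special_index_list, String.ofList removed)

-- ===== PORT B =====
def get_special_character_index_and_removed_string_alt (x : String) : List Int × String :=
  -- for i, ch in enumerate(x): record index if special, else keep ch; ''.join(kept)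
  let p : List Int × List Char :=
    (PySem.List.enumerate x.toList 0).foldl
      (fun (acc : List Int × List Char) e =>
        if pvIsSpecial e.2 then (acc.1 ++ [e.1], acc.2) else (acc.1, acc.2 ++ [e.2]))
      ([], [])
  (p.1, String.ofList p.2)

-- ===== PRECONDITION & SPEC =====
def Spec_get_special_character_index_and_removed_string (x : String) (out : List Int × String) : Prop := out = get_special_character_index_and_removed_string_alt x
instance (x : String) (out : List Int × String) : Decidable (Spec_get_special_character_index_and_removed_string x out) := by unfold Spec_get_special_character_index_and_removed_string; infer_instance

-- ===== CLAIM (what is proved, stated in full; the proofs are below) =====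
def Claim_equal_get_special_character_index_and_removed_string : Prop := ∀ (x : String), Dom_get_special_character_index_and_removed_string x → Spec_get_special_character_index_and_removed_string x (get_special_character_index_and_removed_string x)

-- ===== LEMMAS AND PROOFS =====

-- proof helpers: the removal step of A's second loop in take/drop form, and A's index list
def pvStep (Q : Int → Prop) [DecidablePred Q] (s : List Char) (j : Int) : List Char :=
  if Q j then s.take j.toNat ++ s.drop (j + 1).toNat else s

def pvIdxs (l : List Char) : List Int :=
  (PySem.List.pyRange 0 (l.length : Int) 1).filter (fun i => pvIsSpecial (PySem.List.pyGetD l i 'a'))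

theorem pv_foldl_append_if (p : Int → Bool) (xs : List Int) (acc : List Int) :
    xs.foldl (fun a i => if p i then a ++ [i] else a) acc = acc ++ xs.filter p := by
  induction xs generalizing acc with
  | nil => simp
  | cons x xs ih =>
    by_cases h : p x <;> simp [List.foldl_cons, h, ih]

theorem pv_mem_pvIdxs (l : List Char) (j : Int) :
    j ∈ pvIdxs l ↔ (0 ≤ j ∧ j < (l.length : Int) ∧ pvIsSpecial (PySem.List.pyGetD l j 'a') = true) := by
  simp [pvIdxs, List.mem_filter, PySem.List.mem_pyRange_one, and_assoc]

theorem pv_step_shift (Q : Int → Prop) [DecidablePred Q] (c : Char) (j : Int) (hj : 1 ≤ j)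
    (t : List Char) :
    pvStep Q (c :: t) j = c :: pvStep (fun i => Q (i + 1)) t (j - 1) := by
  have h3 : j - 1 + 1 = j := by ring
  simp only [pvStep, h3]
  split_ifs with hQ
  · have h2 : j.toNat = (j - 1).toNat + 1 := by omega
    have h1 : (j + 1).toNat = ((j - 1).toNat + 1) + 1 := by omega
    rw [h1, h2, List.take_succ_cons, List.drop_succ_cons, List.cons_append]
  · rfl

theorem pv_fold_shift (Q : Int → Prop) [DecidablePred Q] (c : Char) (k : Nat) :
    ∀ t : List Char,
      (PySem.List.pyRange ((k : Int) + 1) 0 (-1)).foldl (pvStep Q) (c :: t)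
        = c :: (PySem.List.pyRange (k : Int) (-1) (-1)).foldl (pvStep (fun i => Q (i + 1))) t := by
  induction k with
  | zero =>
    intro t
    have e1 : PySem.List.pyRange (((0 : Nat) : Int) + 1) 0 (-1) = [1] := by decide
    have e2 : PySem.List.pyRange ((0 : Nat) : Int) (-1) (-1) = [0] := by decide
    rw [e1, e2]
    simp only [List.foldl_cons, List.foldl_nil]
    rw [pv_step_shift Q c 1 (by norm_num)]
    norm_num
  | succ k ih =>
    intro t
    have hc : (((k + 1 : Nat)) : Int) = (k : Int) + 1 := by push_cast; ring
    rw [hc]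
    rw [PySem.List.pyRange_neg_one_cons (a := (k : Int) + 1 + 1) (by omega)]
    rw [PySem.List.pyRange_neg_one_cons (a := (k : Int) + 1) (by omega)]
    have e3 : (k : Int) + 1 + 1 - 1 = (k : Int) + 1 := by ring
    have e4 : (k : Int) + 1 - 1 = (k : Int) := by ring
    rw [e3, e4]
    simp only [List.foldl_cons]
    rw [pv_step_shift Q c ((k : Int) + 1 + 1) (by omega)]
    rw [e3]
    exact ih _

theorem pv_countdown_split (m : Nat) :
    PySem.List.pyRange (m : Int) (-1) (-1) = PySem.List.pyRange (m : Int) 0 (-1) ++ [0] := by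
  rw [PySem.List.pyRange_neg_one_eq_reverse, PySem.List.pyRange_neg_one_eq_reverse]
  have e1 : ((-1 : Int) + 1) = 0 := by ring
  have e2 : ((0 : Int) + 1) = 1 := by ring
  rw [e1, e2]
  rw [PySem.List.pyRange_one_append 0 1 ((m : Int) + 1) (by norm_num) (by omega)]
  have e3 : PySem.List.pyRange 0 1 1 = [0] := by decide
  rw [List.reverse_append, e3]
  simp

theorem pv_removal_eq_filter (sp : Char → Bool) (l : List Char) :
    ∀ (Q : Int → Prop) [DecidablePred Q],
      (∀ j : Int, 0 ≤ j → (Q j ↔ (j < (l.length : Int) ∧ sp (l.getD j.toNat 'a') = true))) →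
      (PySem.List.pyRange (l.length : Int) (-1) (-1)).foldl (pvStep Q) l
        = l.filter (fun c => !sp c) := by
  induction l with
  | nil =>
    intro Q _ hQ
    have e : PySem.List.pyRange ((List.length ([] : List Char) : Int)) (-1) (-1) = [0] := by decide
    rw [e]
    simp only [List.foldl_cons, List.foldl_nil, pvStep]
    have hn : ¬ Q 0 := by
      intro h
      have := (hQ 0 (by norm_num)).mp h
      simp at this
    rw [if_neg hn]
    simp
  | cons c s ih =>
    intro Q _ hQ
    have hlen : ((c :: s).length : Int) = ((s.length + 1 : Nat) : Int) := by push_cast; simp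
    rw [hlen, pv_countdown_split (s.length + 1), List.foldl_append]
    have hc1 : (((s.length + 1 : Nat)) : Int) = (s.length : Int) + 1 := by push_cast; ring
    rw [hc1, pv_fold_shift Q c s.length s]
    have hQ' : ∀ j : Int, 0 ≤ j →
        ((fun i => Q (i + 1)) j ↔ (j < (s.length : Int) ∧ sp (s.getD j.toNat 'a') = true)) := by
      intro j hj
      simp only
      rw [hQ (j + 1) (by omega)]
      have ht : (j + 1).toNat = j.toNat + 1 := by omega
      rw [ht]
      simp only [List.getD_cons_succ, List.length_cons]
      constructor
      · rintro ⟨h1, h2⟩; exact ⟨by push_cast at h1 ⊢; omega, h2⟩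
      · rintro ⟨h1, h2⟩; exact ⟨by push_cast; omega, h2⟩
    rw [ih (fun i => Q (i + 1)) hQ']
    simp only [List.foldl_cons, List.foldl_nil, pvStep]
    have hQ0 : Q 0 ↔ sp c = true := by
      rw [hQ 0 (by norm_num)]
      simp only [Int.toNat_zero, List.getD_cons_zero, List.length_cons]
      constructor
      · exact fun h => h.2
      · exact fun h => ⟨by push_cast; omega, h⟩
    by_cases hsp : sp c = true
    · rw [if_pos (hQ0.mpr hsp)]
      simp [hsp]
    · rw [if_neg (fun h => hsp (hQ0.mp h))]
      have hb : (!sp c) = true := by simp at hsp ⊢; exact hsp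
      simp [hb]


theorem pv_A_eq (x : String) :
    get_special_character_index_and_removed_string x
      = (pvIdxs x.toList, String.ofList ((x.toList).filter (fun c => !pvIsSpecial c))) := by
  unfold get_special_character_index_and_removed_string
  have hidx :
      (PySem.List.pyRange 0 (x.toList.length : Int) 1).foldl
        (fun acc i => if pvIsSpecial (PySem.List.pyGetD x.toList i 'a') then acc ++ [i] else acc) []
        = pvIdxs x.toList := by
    rw [pv_foldl_append_if (fun i => pvIsSpecial (PySem.List.pyGetD x.toList i 'a'))]
    simp [pvIdxs]
  simp only [hidx]
  congr 1
  congr 1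
  rw [PySem.List.foldl_congr_mem _ _
      (pvStep (fun j => j ∈ pvIdxs x.toList)) _
      (by
        intro acc j hjmem
        have hj : 0 ≤ j := by
          have := PySem.List.mem_pyRange_neg_one.mp hjmem
          omega
        unfold pvStep
        by_cases h : j ∈ pvIdxs x.toList
        · rw [if_pos h, if_pos h]
          rw [PySem.List.slice_to _ hj, PySem.List.slice_from _ (by omega)]
        · rw [if_neg h, if_neg h])]
  apply pv_removal_eq_filter pvIsSpecial x.toList (fun j => j ∈ pvIdxs x.toList)
  intro j hj
  rw [pv_mem_pvIdxs]
  constructor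
  · rintro ⟨_, h1, h2⟩
    refine ⟨h1, ?_⟩
    rw [show j = ((j.toNat : Nat) : Int) from (Int.toNat_of_nonneg hj).symm] at h2
    rwa [PySem.List.pyGetD_natCast] at h2
  · rintro ⟨h1, h2⟩
    refine ⟨hj, h1, ?_⟩
    rw [show j = ((j.toNat : Nat) : Int) from (Int.toNat_of_nonneg hj).symm]
    rwa [PySem.List.pyGetD_natCast]

theorem pv_pair_fold (p : Char → Bool) (es : List (Int × Char)) :
    ∀ (a : List Int) (b : List Char),
      es.foldl
        (fun (acc : List Int × List Char) e =>
          if p e.2 then (acc.1 ++ [e.1], acc.2) else (acc.1, acc.2 ++ [e.2])) (a, b)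
        = (a ++ (es.filter (fun e => p e.2)).map (fun e => e.1),
           b ++ (es.filter (fun e => !p e.2)).map (fun e => e.2)) := by
  induction es with
  | nil => intro a b; simp
  | cons e es ih =>
    intro a b
    by_cases h : p e.2 <;> simp [List.foldl_cons, h, ih]


theorem pv_range_filter_map (q : Char → Bool) (l : List Char) :
    ((List.range l.length).filter (fun k => q (l.getD k 'a'))).map (fun k => l.getD k 'a')
      = l.filter q := by
  induction l with
  | nil => simp
  | cons c s ih =>
    rw [List.length_cons, List.range_succ_eq_map]
    rw [List.filter_cons, List.filter_map]
    simp only [List.getD_cons_zero, Function.comp_def, List.getD_cons_succ]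
    by_cases h : q c
    · rw [if_pos h, List.map_cons, List.map_map]
      simp only [List.getD_cons_zero, Function.comp_def, List.getD_cons_succ, ih]
      rw [List.filter_cons_of_pos h]
    · rw [if_neg h, List.map_map]
      simp only [Function.comp_def, List.getD_cons_succ, ih]
      rw [List.filter_cons_of_neg h]


theorem pv_B_eq (x : String) :
    get_special_character_index_and_removed_string_alt x
      = (pvIdxs x.toList, String.ofList ((x.toList).filter (fun c => !pvIsSpecial c))) := by
  unfold get_special_character_index_and_removed_string_alt
  rw [PySem.List.enumerate_eq_map_pyRange x.toList 'a']
  rw [pv_pair_fold pvIsSpecial]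
  simp only [List.nil_append]
  have hlen : PySem.List.len x.toList = (x.toList.length : Int) := by
    simp [PySem.List.len]
  rw [hlen]
  congr 1
  · -- index component
    rw [List.filter_map, List.map_map]
    simp only [Function.comp_def]
    simp [pvIdxs]
  · -- string component
    congr 1
    rw [List.filter_map, List.map_map]
    simp only [Function.comp_def]
    rw [PySem.List.pyRange_one 0 (x.toList.length : Int)]
    rw [List.filter_map, List.map_map]
    simp only [Function.comp_def, zero_add, Int.sub_zero, Int.toNat_natCast,
      PySem.List.pyGetD_natCast]
    exact pv_range_filter_map (fun c => !pvIsSpecial c) x.toList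

-- ===== VERDICT (by name: the statement is the Claim_ definition above) =====
theorem get_special_character_index_and_removed_string_spec : Claim_equal_get_special_character_index_and_removed_string := by
  intro x _
  unfold Spec_get_special_character_index_and_removed_string
  rw [pv_A_eq, pv_B_eq]
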